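-- pv_equiv track=rewrite | github.com/haggai333/a2sv_progress_tracker | 2390-removing-stars-from-a-string/2390-removing-stars-from-a-string.py | removeStars
-- ===== SOURCE A (Python) =====
-- def removeStars(s):
--     count=0
--     temp=[]
--     i=len(s)-1
--     while i>-1:
--         if s[i]=="*":
--             count+=1
--             i-=1
--             continue
--         if count>0:
--             count-=1
--             i-=1
--             continue
--         temp.append(s[i])
--         i-=1
--     l=0
--     r=len(temp)-1
--     while r>l:
--         temp[r],temp[l]=temp[l],temp[r]
--         r-=1
--         l+=1
--
--     return "".join(temp)
-- ===== SOURCE B (Python) =====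
-- def removeStars(s):
--     stack = []
--     for ch in s:
--         if ch == "*":
--             if stack:
--                 stack.pop()
--         else:
--             stack.append(ch)
--     return "".join(stack)
-- ===== Notes on version B (the rewrite author's own statement) =====
-- stated objective: idiomatic
-- what changed: Replaces A's backward scan with a pending-delete counter followed by a manual two-pointer in-place reversal by the canonical single forward pass maintaining the result directly as a stack (push non-stars, guarded pop on '*'), with no reversal step.
import Mathlib
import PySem

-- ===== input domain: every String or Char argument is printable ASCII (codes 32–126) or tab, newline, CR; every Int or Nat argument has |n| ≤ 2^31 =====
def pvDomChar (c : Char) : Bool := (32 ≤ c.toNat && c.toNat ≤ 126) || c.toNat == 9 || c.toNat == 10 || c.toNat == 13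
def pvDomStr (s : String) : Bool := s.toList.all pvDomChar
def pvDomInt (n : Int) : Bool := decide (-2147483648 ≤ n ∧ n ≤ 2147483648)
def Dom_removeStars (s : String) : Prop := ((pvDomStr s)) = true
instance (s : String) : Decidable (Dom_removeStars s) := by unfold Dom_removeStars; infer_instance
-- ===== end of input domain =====

-- B replaces A's backward scan + pending-delete counter + manual in-place reversal
-- by the canonical forward stack (push non-stars, guarded pop on '*'); same return value.

-- ===== PORT A =====
-- the backward index loop: while i > -1 with the star counter
def pvALoop (cs : List Char) (i : Int) (count : Int) (temp : List Char) : List Char :=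
  if _h : i > -1 then
    match PySem.List.pyGet? cs i with
    | some c =>
      if c = '*' then pvALoop cs (i - 1) (count + 1) temp
      else if count > 0 then pvALoop cs (i - 1) (count - 1) temp
      else pvALoop cs (i - 1) count (temp ++ [c])
    | none => temp  -- unreachable: 0 ≤ i < len(cs) whenever the branch is taken with valid i
  else temp
termination_by (i + 1).toNat
decreasing_by all_goals omega

-- the manual two-pointer in-place reversal: while r > l, swap temp[l] and temp[r]
def pvSwapLoop (temp : List Char) (l r : Int) : List Char :=
  if _h : r > l then
    match PySem.List.pyGet? temp l, PySem.List.pyGet? temp r with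
    | some a, some b => pvSwapLoop ((temp.set r.toNat a).set l.toNat b) (l + 1) (r - 1)
    | _, _ => temp  -- unreachable with in-range l, r
  else temp
termination_by (r - l).toNat
decreasing_by omega

def removeStars (s : String) : String :=
  let temp := pvALoop s.toList ((s.toList.length : Int) - 1) 0 []
  String.mk (pvSwapLoop temp 0 ((temp.length : Int) - 1))

-- ===== PORT B =====
-- forward stack: append non-stars, guarded pop on '*'
def pvStep (st : List Char) (c : Char) : List Char :=
  if c = '*' then (if st = [] then st else st.dropLast) else st ++ [c]

def removeStars_alt (s : String) : String :=
  String.mk (s.toList.foldl pvStep [])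

-- ===== PRECONDITION & SPEC =====
def Spec_removeStars (s : String) (out : String) : Prop := out = removeStars_alt s
instance (s : String) (out : String) : Decidable (Spec_removeStars s out) := by unfold Spec_removeStars; infer_instance

-- ===== CLAIM (what is proved, stated in full; the proofs are below) =====
def Claim_equal_removeStars : Prop := ∀ (s : String), Dom_removeStars s → Spec_removeStars s (removeStars s)

-- ===== LEMMAS AND PROOFS =====

-- abstraction of A's backward loop: process the reversed string with a pending-star counter
def pvH : List Char → Nat → List Char
  | [], _ => []
  | c :: cs, k =>
      if c = '*' then pvH cs (k + 1)
      else if k > 0 then pvH cs (k - 1) else c :: pvH cs k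

-- k-fold dropLast
def pvPopN : List Char → Nat → List Char
  | l, 0 => l
  | l, k + 1 => pvPopN l.dropLast k

lemma pvPopN_nil (k : Nat) : pvPopN [] k = [] := by
  induction k with
  | zero => rfl
  | succ k ih => simpa [pvPopN] using ih

lemma pvStep_star (st : List Char) : pvStep st '*' = st.dropLast := by
  cases st <;> simp [pvStep]

-- A's loop computes pvH of the processed prefix, reversed
lemma pvALoop_eq_pvH (cs : List Char) (n : Nat) (hn : n ≤ cs.length) (k : Nat) (temp : List Char) :
    pvALoop cs ((n : Int) - 1) (k : Int) temp = temp ++ pvH ((cs.take n).reverse) k := by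
  induction n generalizing k temp with
  | zero => rw [pvALoop]; simp [pvH]
  | succ n ih =>
    have hlt : n < cs.length := by omega
    rw [pvALoop]
    have hi : ((n + 1 : Nat) : Int) - 1 = (n : Int) := by push_cast; ring
    rw [hi]
    have hget : PySem.List.pyGet? cs (n : Int) = some cs[n] := by
      simp [PySem.List.pyGet?_natCast, List.getElem?_eq_getElem hlt]
    have htake : (cs.take (n + 1)).reverse = cs[n] :: (cs.take n).reverse := by
      rw [List.take_add_one]
      simp [List.getElem?_eq_getElem hlt]
    simp only [show ((n : Int) > -1) = True by simp; omega, dif_pos, hget]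
    split
    · -- cs[n] = '*'
      rename_i hc
      have : (k : Int) + 1 = ((k + 1 : Nat) : Int) := by push_cast; ring
      rw [this, ih (by omega)]
      rw [htake, pvH, if_pos hc]
    · rename_i hc
      by_cases hk : (k : Int) > 0
      · rw [if_pos hk]
        have hk' : 0 < k := by exact_mod_cast hk
        have : (k : Int) - 1 = ((k - 1 : Nat) : Int) := by omega
        rw [this, ih (by omega)]
        rw [htake, pvH, if_neg hc, if_pos hk']
      · rw [if_neg hk]
        have hk0 : k = 0 := by omega
        rw [ih (by omega)]
        rw [htake, pvH, if_neg hc]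
        simp [hk0]

-- set at the join point of an append
lemma pvSet_append_length (pre suf : List Char) (c v : Char) :
    (pre ++ c :: suf).set pre.length v = pre ++ v :: suf := by
  induction pre with
  | nil => rfl
  | cons x xs ih => simp [ih]

-- the swap loop reverses the middle segment
lemma pvSwapLoop_spec (n : Nat) : ∀ (mid a b : List Char), mid.length = n →
    pvSwapLoop (a ++ mid ++ b) (a.length : Int) ((a.length : Int) + (mid.length : Int) - 1)
      = a ++ mid.reverse ++ b := by
  induction n using Nat.strong_induction_on with
  | _ n IH =>
    intro mid a b hlen
    by_cases hsmall : mid.length ≤ 1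
    · rw [pvSwapLoop]
      rw [dif_neg (by omega)]
      rcases mid with _ | ⟨x, _ | ⟨y, t⟩⟩
      · simp
      · simp
      · exfalso; simp only [List.length_cons] at hsmall hlen; omega
    · -- mid.length ≥ 2 : mid = x :: ms ++ [y]
      rcases mid with _ | ⟨x, rest⟩
      · simp at hsmall
      rcases List.eq_nil_or_concat rest with h | ⟨ms, y, h⟩
      · subst h; simp at hsmall
      subst h
      simp only [List.concat_eq_append] at hlen hsmall ⊢
      rw [pvSwapLoop]
      have hll : ((a.length : Int) + ((x :: (ms ++ [y])).length : Int) - 1)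
          = (((a ++ x :: ms).length : Nat) : Int) := by simp; omega
      rw [dif_pos (by simp; omega)]
      have hgl : PySem.List.pyGet? (a ++ (x :: (ms ++ [y])) ++ b) (a.length : Int) = some x := by
        have : a ++ (x :: (ms ++ [y])) ++ b = a ++ x :: (ms ++ [y] ++ b) := by simp
        rw [this]
        exact PySem.List.pyGet?_append_length a (ms ++ [y] ++ b) x
      have hgr : PySem.List.pyGet? (a ++ (x :: (ms ++ [y])) ++ b)
          ((a.length : Int) + ((x :: (ms ++ [y])).length : Int) - 1) = some y := by
        have he : a ++ (x :: (ms ++ [y])) ++ b = (a ++ x :: ms) ++ y :: b := by simp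
        rw [hll, he]
        exact PySem.List.pyGet?_append_length (a ++ x :: ms) b y
      simp only [hgl, hgr]
      have hset : (((a ++ (x :: (ms ++ [y])) ++ b).set
            ((a.length : Int) + ((x :: (ms ++ [y])).length : Int) - 1).toNat x).set
            ((a.length : Int)).toNat y)
          = a ++ (y :: (ms ++ [x])) ++ b := by
        have h1 : ((a.length : Int) + ((x :: (ms ++ [y])).length : Int) - 1).toNat
            = (a ++ x :: ms).length := by simp; omega
        have h2 : ((a.length : Int)).toNat = a.length := by omega
        rw [h1, h2]
        have he : a ++ (x :: (ms ++ [y])) ++ b = (a ++ x :: ms) ++ y :: b := by simp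
        rw [he, pvSet_append_length]
        have he2 : (a ++ x :: ms) ++ x :: b = a ++ x :: (ms ++ x :: b) := by simp
        rw [he2, pvSet_append_length]
        simp
      rw [hset]
      have harith1 : ((a.length : Int)) + 1 = (((a ++ [y]).length : Nat) : Int) := by
        simp
      have harith2 : (a.length : Int) + ((x :: (ms ++ [y])).length : Int) - 1 - 1
          = (((a ++ [y]).length : Nat) : Int) + ((ms.length : Nat) : Int) - 1 := by
        push_cast [List.length_append, List.length_cons]; omega
      have he3 : a ++ (y :: (ms ++ [x])) ++ b = (a ++ [y]) ++ ms ++ ([x] ++ b) := by simp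
      rw [harith1, harith2, he3]
      rw [IH ms.length (by simp at hlen ⊢; omega) ms (a ++ [y]) ([x] ++ b) rfl]
      simp

-- B's fold, seen from the right, matches pvH of the reversed input
lemma pvH_eq_popN_fold (ys : List Char) : ∀ (k : Nat),
    pvH ys k = (pvPopN (ys.reverse.foldl pvStep []) k).reverse := by
  induction ys with
  | nil => intro k; simp [pvH, pvPopN_nil]
  | cons c ys ih =>
    intro k
    have hfold : (c :: ys).reverse.foldl pvStep [] = pvStep (ys.reverse.foldl pvStep []) c := by
      simp [List.foldl_append]
    rw [pvH, hfold]
    by_cases hc : c = '*'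
    · rw [if_pos hc, hc, pvStep_star, ih (k + 1)]
      rfl
    · rw [if_neg hc]
      by_cases hk : k > 0
      · rw [if_pos hk]
        obtain ⟨j, rfl⟩ : ∃ j, k = j + 1 := ⟨k - 1, by omega⟩
        simp only [Nat.add_sub_cancel]
        rw [ih j]
        simp [pvPopN, pvStep, hc]
      · rw [if_neg hk]
        have hk0 : k = 0 := by omega
        subst hk0
        rw [ih 0]
        simp [pvPopN, pvStep, hc]

-- ===== VERDICT (by name: the statement is the Claim_ definition above) =====
theorem removeStars_spec : Claim_equal_removeStars := by
  intro s _
  simp only [Spec_removeStars, removeStars, removeStars_alt]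
  have h1 : pvALoop s.toList ((s.toList.length : Int) - 1) 0 []
      = pvH (s.toList.reverse) 0 := by
    have h := pvALoop_eq_pvH s.toList s.toList.length (le_refl _) 0 []
    simpa only [List.take_length, List.nil_append] using h
  have h2 : pvH (s.toList.reverse) 0 = (s.toList.foldl pvStep []).reverse := by
    have := pvH_eq_popN_fold s.toList.reverse 0
    simpa [pvPopN] using this
  set L := s.toList.foldl pvStep [] with hL
  have htemp : pvALoop s.toList ((s.toList.length : Int) - 1) 0 [] = L.reverse := by
    rw [h1, h2]
  rw [htemp]
  have hswap : pvSwapLoop L.reverse 0 ((L.reverse.length : Int) - 1) = L := by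
    have := pvSwapLoop_spec L.reverse.length L.reverse [] [] rfl
    simpa using this
  rw [hswap]
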